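-- pv_equiv track=rewrite | github.com/Ko-/aes-armcortexm | scheduler/scheduleandallocate.py | regtoclear
-- ===== SOURCE A (Python) =====
-- def regtoclear(sboxslice, registers):
--   #aka vartospill
--   #if no longer necessary as input, choose that
--   #otherwise, choose for reg with longest distance until need
--   maxdist = -1
--   maxr = "X"
--   #(don't?) ban output registers
--   #suitableregisters = registers
--   #suitableregisters = {r: v for r,v in registers.items() if not (v.lower().startswith('s') and v.endswith('m'))}
--   suitableregisters = {r: v for r,v in registers.items() if not v.lower().startswith('s')}
--
--   for r in suitableregisters:
--     necessary = False
--     for j in range(1,len(sboxslice)):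
--       if sboxslice[j][0] == registers[r]:
--         break
--       if registers[r] in sboxslice[j][1]:
--         necessary = True
--         if j > maxdist:
--           maxdist = j
--           maxr = r
--         break
--     if registers[r].lower().startswith('s'):
--       return (r, True)
--     if not necessary:
--       return (r, False)
--   assert maxr != "X"
--   return (maxr, True)
-- ===== SOURCE B (Python) =====
-- def regtoclear(sboxslice, registers):
--     # One pass over sboxslice records, for each value, its FIRST event:
--     # None if it first appears as an output (sboxslice[j][0], not needed),
--     # or the index j where it is first needed as an input (sboxslice[j][1]).
--     # Then one O(R) pass over the registers uses these precomputed events.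
--     event = {}
--     for j in range(1, len(sboxslice)):
--         head, uses = sboxslice[j][0], sboxslice[j][1]
--         if head not in event:
--             event[head] = None
--         for u in uses:
--             if u not in event:
--                 event[u] = j
--     best_r = None
--     best_j = -1
--     for r, v in registers.items():
--         if v.lower().startswith('s'):
--             continue
--         e = event.get(v)
--         if e is None:
--             return (r, False)
--         if e > best_j:
--             best_j = e
--             best_r = r
--     assert best_r is not None
--     return (best_r, True)
-- ===== Notes on version B (the rewrite author's own statement) =====
-- stated objective: faster
-- what changed: Instead of rescanning sboxslice for every register, B precomputes in one pass a dict mapping each value to its first event (output = not needed, or first input index = distance), then decides each register with an O(1) lookup.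
import Mathlib
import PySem

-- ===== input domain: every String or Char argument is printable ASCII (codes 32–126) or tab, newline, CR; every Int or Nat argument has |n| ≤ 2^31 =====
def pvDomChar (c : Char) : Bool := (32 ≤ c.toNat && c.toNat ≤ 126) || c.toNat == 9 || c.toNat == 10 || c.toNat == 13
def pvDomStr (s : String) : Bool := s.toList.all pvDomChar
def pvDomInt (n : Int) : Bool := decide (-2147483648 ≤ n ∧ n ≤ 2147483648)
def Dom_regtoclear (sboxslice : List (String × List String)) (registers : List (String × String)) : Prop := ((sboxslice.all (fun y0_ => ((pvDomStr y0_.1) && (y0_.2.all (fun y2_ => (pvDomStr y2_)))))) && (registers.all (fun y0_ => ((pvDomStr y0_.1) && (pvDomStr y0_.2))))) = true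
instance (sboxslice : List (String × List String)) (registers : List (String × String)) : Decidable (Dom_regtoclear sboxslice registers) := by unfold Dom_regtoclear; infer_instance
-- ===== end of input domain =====

-- B replaces A's per-register rescan of sboxslice by a single precomputed first-event
-- dict plus one register pass (objective: faster, asymptotically).

-- ===== PORT A =====
-- v.lower().startswith('s')
def lowS (v : String) : Bool := PySem.Str.startswith (PySem.Str.lower v) "s"

-- the Python `registers` argument is a dict; both ports interpret the assoc list as that dict
def regDict (registers : List (String × String)) : PySem.Dict String String :=
  registers.foldl (fun d rv => d.insert rv.1 rv.2) PySem.Dict.empty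

-- A's inner `for j in range(1, len(sboxslice))` loop over `tail = sboxslice[1:]`:
-- returns `some j` iff it broke with necessary = True at index j, else none
def scanA (v : String) : List (String × List String) → Int → Option Int
  | [], _ => none
  | e :: rest, j =>
      if e.1 == v then none
      else if e.2.contains v then some j
      else scanA v rest (j + 1)

-- A's outer loop over the suitable registers, carrying (maxdist, maxr)
def loopA (d : PySem.Dict String String) (tail : List (String × List String)) :
    List (String × String) → Int → String → String × Bool
  | [], _, maxr => (maxr, true)            -- `assert maxr != "X"` passes inside Pre_
  | rv :: rest, maxdist, maxr =>
      let v := d.getD rv.1 ""              -- registers[r]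
      match scanA v tail 1 with
      | some j =>
          let p := if j > maxdist then (j, rv.1) else (maxdist, maxr)
          if lowS v then (rv.1, true) else loopA d tail rest p.1 p.2
      | none => if lowS v then (rv.1, true) else (rv.1, false)

def regtoclear (sboxslice : List (String × List String)) (registers : List (String × String)) : String × Bool :=
  let d := regDict registers
  -- the dict comprehension `suitableregisters`, iterated in insertion order
  let suitable := d.items.filter (fun rv => !(lowS rv.2))
  loopA d (sboxslice.drop 1) suitable (-1) "X"

-- ===== PORT B =====
-- event.get(v): the dict stores Option Int values, get returns None when absent too
def pyGetOpt (ev : PySem.Dict String (Option Int)) (v : String) : Option Int :=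
  match ev.get? v with
  | some x => x
  | none => none

-- B's first pass: record each value's first event (none = first seen as an output)
def eventLoop : List (String × List String) → Int → PySem.Dict String (Option Int) → PySem.Dict String (Option Int)
  | [], _, ev => ev
  | e :: rest, j, ev =>
      let ev1 := ev.setdefault e.1 none
      let ev2 := e.2.foldl (fun ev u => ev.setdefault u (some j)) ev1
      eventLoop rest (j + 1) ev2

-- B's register pass, carrying (best_r, best_j)
def loopB (ev : PySem.Dict String (Option Int)) :
    List (String × String) → Option String → Int → String × Bool
  | [], bestR, _ => (bestR.getD "", true)  -- `assert best_r is not None` passes inside Pre_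
  | rv :: rest, bestR, bestJ =>
      if lowS rv.2 then loopB ev rest bestR bestJ
      else
        match pyGetOpt ev rv.2 with
        | none => (rv.1, false)
        | some j => if j > bestJ then loopB ev rest (some rv.1) j else loopB ev rest bestR bestJ

def regtoclear_alt (sboxslice : List (String × List String)) (registers : List (String × String)) : String × Bool :=
  let ev := eventLoop (sboxslice.drop 1) 1 PySem.Dict.empty
  let d := regDict registers
  loopB ev d.items none (-1)

-- ===== PRECONDITION & SPEC =====
-- Pre_ excludes exactly the inputs where A's `assert maxr != "X"` fails (AssertionError):
-- the register dict has no value that does not start with 's'/'S'; B's assert fails there too.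
def Pre_regtoclear (sboxslice : List (String × List String)) (registers : List (String × String)) : Prop :=
  (regDict registers).items.any (fun rv => !(lowS rv.2)) = true
instance (sboxslice : List (String × List String)) (registers : List (String × String)) : Decidable (Pre_regtoclear sboxslice registers) := by unfold Pre_regtoclear; infer_instance

def pvWitness_regtoclear : (List (String × List String)) × (List (String × String)) :=
  ([("a", ["b"]), ("b", ["a"])], [("r0", "a"), ("r1", "b")])

def Spec_regtoclear (sboxslice : List (String × List String)) (registers : List (String × String)) (out : String × Bool) : Prop := out = regtoclear_alt sboxslice registers
instance (sboxslice : List (String × List String)) (registers : List (String × String)) (out : String × Bool) : Decidable (Spec_regtoclear sboxslice registers out) := by unfold Spec_regtoclear; infer_instance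

-- ===== CLAIM (what is proved, stated in full; the proofs are below) =====
def Claim_equal_regtoclear : Prop := ∀ (sboxslice : List (String × List String)) (registers : List (String × String)), Dom_regtoclear sboxslice registers → Pre_regtoclear sboxslice registers → Spec_regtoclear sboxslice registers (regtoclear sboxslice registers)

-- ===== LEMMAS AND PROOFS =====

-- left-biased orelse on Option, written out so every proof is by cases
def orO {α : Type} : Option α → Option α → Option α
  | some a, _ => some a
  | none, b => b

theorem orO_none_right {α : Type} (a : Option α) : orO a none = a := by cases a <;> rfl

theorem orO_assoc {α : Type} (a b c : Option α) : orO (orO a b) c = orO a (orO b c) := by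
  cases a <;> rfl

-- the first event of v in tail, starting at index j (spec of both the scan and the dict)
def specO (v : String) : List (String × List String) → Int → Option (Option Int)
  | [], _ => none
  | e :: rest, j =>
      if e.1 == v then some none
      else if e.2.contains v then some (some j)
      else specO v rest (j + 1)

def joinO : Option (Option Int) → Option Int
  | some x => x
  | none => none

theorem scanA_eq_specO (v : String) (l : List (String × List String)) (j : Int) :
    scanA v l j = joinO (specO v l j) := by
  induction l generalizing j with
  | nil => rfl
  | cons e rest ih =>
      simp only [scanA, specO]
      by_cases h1 : (e.1 == v) = true
      · simp [h1, joinO]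
      · by_cases h2 : v ∈ e.2
        · simp [h1, h2, joinO]
        · simp [h1, h2, ih]

theorem scanA_ge (v : String) (l : List (String × List String)) (j0 j : Int)
    (h : scanA v l j0 = some j) : j0 ≤ j := by
  induction l generalizing j0 with
  | nil => simp [scanA] at h
  | cons e rest ih =>
      simp only [scanA] at h
      by_cases h1 : (e.1 == v) = true
      · simp [h1] at h
      · by_cases h2 : v ∈ e.2
        · simp [h1, h2] at h; omega
        · simp [h1, h2] at h
          have := ih _ h
          omega

theorem get?_setdefault (ev : PySem.Dict String (Option Int)) (k v : String) (x : Option Int) :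
    (ev.setdefault k x).get? v = orO (ev.get? v) (if k == v then some x else none) := by
  by_cases hc : ev.contains k = true
  · rw [PySem.Dict.setdefault_of_contains ev x hc]
    by_cases hkv : k = v
    · subst hkv
      have hs : (ev.get? k).isSome := by rw [← PySem.Dict.contains_eq_isSome_get?]; exact hc
      cases h : ev.get? k with
      | none => rw [h] at hs; simp at hs
      | some w => simp [h, orO]
    · have hb : (k == v) = false := by simp [hkv]
      simp [hb, orO_none_right]
  · rw [PySem.Dict.setdefault_of_not_contains ev x (by simpa using hc)]
    by_cases hkv : v = k
    · subst hkv
      have hn : ev.get? v = none := by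
        cases h : ev.get? v with
        | none => rfl
        | some w =>
            have : ev.contains v = true := by
              rw [PySem.Dict.contains_eq_isSome_get?, h]; rfl
            exact absurd this hc
      simp [PySem.Dict.get?_insert, hn, orO]
    · have h1 : (k == v) = false := by simp; intro h; exact hkv h.symm
      rw [PySem.Dict.get?_insert]
      simp [hkv, h1, orO_none_right]

theorem get?_foldl_setdefault (us : List String) (ev : PySem.Dict String (Option Int))
    (v : String) (j : Int) :
    ((us.foldl (fun ev u => ev.setdefault u (some j)) ev).get? v) =
      orO (ev.get? v) (if us.contains v then some (some j) else none) := by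
  induction us generalizing ev with
  | nil => simp [orO_none_right]
  | cons u rest ih =>
      simp only [List.foldl_cons]
      rw [ih, get?_setdefault, orO_assoc]
      congr 1
      by_cases h : (u == v) = true
      · have hv : u = v := by simpa using h
        subst hv
        simp [orO]
      · have hv : ¬ v = u := fun e => h (by simp [e])
        by_cases hm : v ∈ rest <;> simp [orO, h, hv, hm]

theorem get?_eventLoop (l : List (String × List String)) (j : Int)
    (ev : PySem.Dict String (Option Int)) (v : String) :
    (eventLoop l j ev).get? v = orO (ev.get? v) (specO v l j) := by
  induction l generalizing j ev with
  | nil => simp [eventLoop, specO, orO_none_right]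
  | cons e rest ih =>
      simp only [eventLoop, specO]
      rw [ih, get?_foldl_setdefault, get?_setdefault, orO_assoc, orO_assoc]
      congr 1
      by_cases h1 : (e.1 == v) = true
      · simp [h1, orO]
      · by_cases h2 : v ∈ e.2 <;> simp [h1, h2, orO]

-- the scan A performs equals the dict lookup B performs
theorem scanA_eq_pyGetOpt (tail : List (String × List String)) (v : String) :
    scanA v tail 1 = pyGetOpt (eventLoop tail 1 PySem.Dict.empty) v := by
  have h := get?_eventLoop tail 1 PySem.Dict.empty v
  rw [scanA_eq_specO]
  unfold pyGetOpt
  rw [h, PySem.Dict.get?_empty]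
  cases hs : specO v tail 1 <;> simp [orO, joinO, hs]

-- the two loops agree, given the lookup correspondence and the state invariant
theorem loop_eq (d : PySem.Dict String String) (tail : List (String × List String))
    (ev : PySem.Dict String (Option Int))
    (hev : ∀ v, scanA v tail 1 = pyGetOpt ev v) :
    ∀ (items : List (String × String)) (maxdist : Int) (maxr : String) (bestR : Option String),
      (∀ rv ∈ items, d.get? rv.1 = some rv.2) →
      (bestR = some maxr ∨ (bestR = none ∧ maxdist = -1 ∧ items.any (fun rv => !(lowS rv.2)) = true)) →
      loopA d tail (items.filter (fun rv => !(lowS rv.2))) maxdist maxr = loopB ev items bestR maxdist := by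
  intro items
  induction items with
  | nil =>
      intro maxdist maxr bestR _ hst
      rcases hst with h | ⟨_, _, h⟩
      · subst h; rfl
      · simp at h
  | cons rv rest ih =>
      intro maxdist maxr bestR hmem hst
      have hv : d.getD rv.1 "" = rv.2 := by
        rw [PySem.Dict.getD_eq_get?_getD, hmem rv (by simp)]; rfl
      by_cases hs : lowS rv.2 = true
      · -- unsuitable: A's comprehension drops it, B continues
        have hf : (rv :: rest).filter (fun rv => !(lowS rv.2)) = rest.filter (fun rv => !(lowS rv.2)) := by
          simp [List.filter_cons, hs]
        rw [hf]
        simp only [loopB, hs, if_pos rfl]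
        apply ih _ _ _ (fun x hx => hmem x (by simp [hx]))
        rcases hst with h | ⟨h1, h2, h3⟩
        · exact Or.inl h
        · refine Or.inr ⟨h1, h2, ?_⟩
          simpa [hs] using h3
      · have hf : (rv :: rest).filter (fun rv => !(lowS rv.2)) =
            rv :: rest.filter (fun rv => !(lowS rv.2)) := by
          simp [List.filter_cons, hs]
        rw [hf]
        simp only [loopA, loopB, hv, hs, if_neg, Bool.false_eq_true, not_false_iff]
        rw [hev rv.2]
        cases hscan : pyGetOpt ev rv.2 with
        | none => simp [hs]
        | some j =>
            have hj1 : (1 : Int) ≤ j := scanA_ge rv.2 tail 1 j (by rw [hev rv.2, hscan])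
            by_cases hgt : j > maxdist
            · simp only [hs, Bool.false_eq_true, if_false, if_pos hgt]
              exact ih j rv.1 (some rv.1) (fun x hx => hmem x (by simp [hx])) (Or.inl rfl)
            · simp only [hs, Bool.false_eq_true, if_false, if_neg hgt]
              rcases hst with h | ⟨_, h2, _⟩
              · exact ih maxdist maxr bestR (fun x hx => hmem x (by simp [hx])) (Or.inl h)
              · omega

theorem regDict_nodup (registers : List (String × String)) : (regDict registers).keys.Nodup := by
  unfold regDict
  exact PySem.Dict.nodup_keys_foldl_insert_key registers Prod.fst
    (fun _ rv => rv.2) PySem.Dict.empty (by simp [PySem.Dict.keys_empty])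

-- ===== VERDICT (by name: the statement is the Claim_ definition above) =====
theorem regtoclear_spec : Claim_equal_regtoclear := by
  intro sboxslice registers _ hpre
  unfold Spec_regtoclear regtoclear regtoclear_alt
  apply loop_eq
  · exact fun v => scanA_eq_pyGetOpt (sboxslice.drop 1) v
  · intro rv hrv
    exact PySem.Dict.get?_of_mem_items _ hrv (regDict_nodup registers)
  · exact Or.inr ⟨rfl, rfl, hpre⟩
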